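-- pv_equiv track=rewrite | github.com/facebookarchive/codemod | codemod/base.py | _index_to_row_col
-- ===== SOURCE A (Python) =====
-- def _index_to_row_col(lines, index):
--     r"""
--     >>> lines = ['hello\n', 'world\n']
--     >>> _index_to_row_col(lines, 0)
--     (0, 0)
--     >>> _index_to_row_col(lines, 7)
--     (1, 1)
--     """
--     if index < 0:
--         raise IndexError('negative index')
--     current_index = 0
--     for line_number, line in enumerate(lines):
--         line_length = len(line)
--         if current_index + line_length > index:
--             return line_number, index - current_index
--         current_index += line_length
--     raise IndexError('index %d out of range' % index)
-- ===== SOURCE B (Python) =====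
-- def _index_to_row_col(lines, index):
--     if index < 0:
--         raise IndexError('negative index')
--     # cumulative end offsets: ends[k] = len(lines[0]) + ... + len(lines[k])
--     ends = []
--     total = 0
--     for line in lines:
--         total += len(line)
--         ends.append(total)
--     # binary search: first position whose end offset is strictly greater than index
--     lo, hi = 0, len(ends)
--     while lo < hi:
--         mid = (lo + hi) // 2
--         if ends[mid] <= index:
--             lo = mid + 1
--         else:
--             hi = mid
--     if lo == len(ends):
--         raise IndexError('index %d out of range' % index)
--     return lo, index - (ends[lo - 1] if lo > 0 else 0)
-- ===== Notes on version B (the rewrite author's own statement) =====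
-- stated objective: alternative
-- what changed: Replaces A's single linear enumerate-scan carrying a running offset with precomputed cumulative line-end offsets plus a binary search for the first end strictly greater than the index.
import Mathlib
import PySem

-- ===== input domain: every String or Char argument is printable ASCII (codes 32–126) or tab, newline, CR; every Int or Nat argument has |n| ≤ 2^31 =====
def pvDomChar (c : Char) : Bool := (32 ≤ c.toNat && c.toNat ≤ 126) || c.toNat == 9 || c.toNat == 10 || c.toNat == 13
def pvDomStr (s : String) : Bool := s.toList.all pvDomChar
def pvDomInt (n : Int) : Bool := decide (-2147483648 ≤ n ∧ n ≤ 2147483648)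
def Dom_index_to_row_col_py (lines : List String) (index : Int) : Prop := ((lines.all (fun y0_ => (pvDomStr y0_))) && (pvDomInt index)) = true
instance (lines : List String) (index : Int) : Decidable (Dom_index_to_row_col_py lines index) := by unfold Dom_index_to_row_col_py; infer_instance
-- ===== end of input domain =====

-- B replaces A's linear enumerate-scan with cumulative line-end offsets plus a binary
-- search for the first offset strictly greater than the index (objective: alternative).

-- ===== PORT A =====
-- the enumerate loop with running current_index; [] reaches the out-of-range raise (excluded by Pre_)
def goA_index_to_row_col (index : Int) : List String → Int → Int → Int × Int
  | [], _, _ => (0, 0)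
  | line :: rest, lineNumber, currentIndex =>
      let lineLength := PySem.Str.len line
      if currentIndex + lineLength > index then (lineNumber, index - currentIndex)
      else goA_index_to_row_col index rest (lineNumber + 1) (currentIndex + lineLength)

def index_to_row_col_py (lines : List String) (index : Int) : Int × Int :=
  if index < 0 then (0, 0)   -- raise IndexError('negative index'), excluded by Pre_
  else goA_index_to_row_col index lines 0 0

-- ===== PORT B =====
-- the loop building the cumulative end-offset list `ends`
def buildEnds (lines : List String) (total : Int) : List Int :=
  match lines with
  | [] => []
  | line :: rest => (total + PySem.Str.len line) :: buildEnds rest (total + PySem.Str.len line)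

-- Source B's hand-written while-loop binary search; `ends[mid]` is always in range here,
-- so `getD` is exact for Python's indexing
def bsearchEnds (ends : List Int) (index : Int) (lo hi : Nat) : Nat :=
  if lo < hi then
    let mid := (lo + hi) / 2
    if ends.getD mid 0 ≤ index then bsearchEnds ends index (mid + 1) hi
    else bsearchEnds ends index lo mid
  else lo
termination_by hi - lo
decreasing_by all_goals omega

def index_to_row_col_py_alt (lines : List String) (index : Int) : Int × Int :=
  if index < 0 then (0, 0)   -- raise IndexError('negative index'), excluded by Pre_
  else
    let ends := buildEnds lines 0
    let lo := bsearchEnds ends index 0 ends.length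
    if lo = ends.length then (0, 0)   -- raise IndexError('index %d out of range'), excluded by Pre_
    else ((lo : Int), index - (if 0 < lo then ends.getD (lo - 1) 0 else 0))

-- ===== PRECONDITION & SPEC =====
-- Pre_ excludes exactly the inputs on which A raises IndexError: a negative index, and an
-- index at or beyond the total length of all lines.
def Pre_index_to_row_col_py (lines : List String) (index : Int) : Prop :=
  0 ≤ index ∧ index < (lines.map PySem.Str.len).sum
instance (lines : List String) (index : Int) : Decidable (Pre_index_to_row_col_py lines index) := by unfold Pre_index_to_row_col_py; infer_instance

def pvWitness_index_to_row_col_py : List String × Int := (["hello\n", "world\n"], 7)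

def Spec_index_to_row_col_py (lines : List String) (index : Int) (out : Int × Int) : Prop := out = index_to_row_col_py_alt lines index
instance (lines : List String) (index : Int) (out : Int × Int) : Decidable (Spec_index_to_row_col_py lines index out) := by unfold Spec_index_to_row_col_py; infer_instance

-- ===== CLAIM (what is proved, stated in full; the proofs are below) =====
def Claim_equal_index_to_row_col_py : Prop := ∀ (lines : List String) (index : Int), Dom_index_to_row_col_py lines index → Pre_index_to_row_col_py lines index → Spec_index_to_row_col_py lines index (index_to_row_col_py lines index)

-- ===== LEMMAS AND PROOFS =====

-- prefix sum of line lengths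
def pvP (lines : List String) (k : Nat) : Int := ((lines.take k).map PySem.Str.len).sum

theorem pvP_zero (lines : List String) : pvP lines 0 = 0 := rfl

theorem str_len_nonneg (s : String) : 0 ≤ PySem.Str.len s := by
  simp [PySem.Str.len_eq]

theorem pvP_succ_ge (lines : List String) (k : Nat) : pvP lines k ≤ pvP lines (k + 1) := by
  rw [pvP, pvP, List.take_add_one]
  simp only [List.map_append, List.sum_append]
  have h : 0 ≤ (List.map PySem.Str.len lines[k]?.toList).sum := by
    cases h : lines[k]? with
    | none => simp
    | some s => simpa using str_len_nonneg s
  omega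

theorem pvP_mono (lines : List String) {i j : Nat} (h : i ≤ j) : pvP lines i ≤ pvP lines j := by
  induction j with
  | zero => simp_all
  | succ j ih =>
      rcases Nat.lt_or_ge i (j+1) with h' | h'
      · exact le_trans (ih (by omega)) (pvP_succ_ge lines j)
      · have : i = j + 1 := by omega
        simp [this]

theorem buildEnds_length (lines : List String) (total : Int) :
    (buildEnds lines total).length = lines.length := by
  induction lines generalizing total with
  | nil => rfl
  | cons l rest ih => simp [buildEnds, ih]

theorem buildEnds_getD (lines : List String) (total : Int) (i : Nat) (h : i < lines.length) :
    (buildEnds lines total).getD i 0 = total + pvP lines (i + 1) := by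
  induction lines generalizing total i with
  | nil => simp at h
  | cons l rest ih =>
      cases i with
      | zero => simp [buildEnds, pvP]
      | succ i =>
          have := ih (total + PySem.Str.len l) i (by simpa using h)
          simp [buildEnds, pvP, List.take_succ_cons] at this ⊢
          omega

-- binary-search invariant
theorem bsearch_spec (ends : List Int) (index : Int)
    (hmono : ∀ i j : Nat, i ≤ j → j < ends.length → ends.getD i 0 ≤ ends.getD j 0) :
    ∀ d lo hi : Nat, hi - lo = d → lo ≤ hi → hi ≤ ends.length →
    (∀ i : Nat, i < lo → ends.getD i 0 ≤ index) →
    (∀ i : Nat, hi ≤ i → i < ends.length → index < ends.getD i 0) →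
    lo ≤ bsearchEnds ends index lo hi ∧ bsearchEnds ends index lo hi ≤ hi ∧
    (∀ i : Nat, i < bsearchEnds ends index lo hi → ends.getD i 0 ≤ index) ∧
    (∀ i : Nat, bsearchEnds ends index lo hi ≤ i → i < ends.length → index < ends.getD i 0) := by
  intro d
  induction d using Nat.strong_induction_on with
  | _ d ih =>
      intro lo hi hd hle hn hlow hhigh
      rw [bsearchEnds]
      by_cases hlh : lo < hi
      · simp only [if_pos hlh]
        set mid := (lo + hi) / 2 with hmid
        have hmlt : mid < hi := by omega
        have hmge : lo ≤ mid := by omega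
        by_cases hcmp : ends.getD mid 0 ≤ index
        · simp only [if_pos hcmp]
          have := ih (hi - (mid + 1)) (by omega) (mid + 1) hi rfl (by omega) hn
            (fun i hi' => by
              rcases Nat.lt_or_ge i lo with h' | h'
              · exact hlow i h'
              · exact le_trans (hmono i mid (by omega) (by omega)) hcmp)
            hhigh
          exact ⟨by omega, by exact this.2.1, this.2.2.1, this.2.2.2⟩
        · simp only [if_neg hcmp]
          push Not at hcmp
          have := ih (mid - lo) (by omega) lo mid rfl (by omega) (by omega) hlow
            (fun i hi1 hi2 => by
              rcases Nat.lt_or_ge i hi with h' | h'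
              · exact lt_of_lt_of_le hcmp (hmono mid i hi1 (by omega))
              · exact hhigh i h' hi2)
          exact ⟨this.1, by omega, this.2.2.1, this.2.2.2⟩
      · simp only [if_neg hlh]
        have : lo = hi := by omega
        exact ⟨le_refl _, by omega, fun i hi' => hlow i (by omega),
          fun i h1 h2 => hhigh i (by omega) h2⟩

-- A's loop returns (k, index - P k) for the unique k with P k ≤ index < P (k+1)
theorem goA_char (lines : List String) (index : Int) :
    ∀ (lineNo cur : Int), cur ≤ index → index < cur + (lines.map PySem.Str.len).sum →
    ∃ k : Nat, k < lines.length ∧ cur + pvP lines k ≤ index ∧ index < cur + pvP lines (k + 1) ∧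
      goA_index_to_row_col index lines lineNo cur = (lineNo + (k : Int), index - (cur + pvP lines k)) := by
  induction lines with
  | nil => intro lineNo cur h1 h2; simp at h2; omega
  | cons l rest ih =>
      intro lineNo cur h1 h2
      by_cases hc : cur + PySem.Str.len l > index
      · refine ⟨0, by simp, by simpa [pvP] using h1, ?_, ?_⟩
        · simpa [pvP, List.take_succ_cons] using hc
        · rw [goA_index_to_row_col]
          simp only [if_pos hc, pvP, List.take_zero, List.map_nil, List.sum_nil]
          norm_num
      · push Not at hc
        obtain ⟨k, hk1, hk2, hk3, hk4⟩ := ih (lineNo + 1) (cur + PySem.Str.len l) hc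
          (by simp at h2 ⊢; omega)
        have hps : ∀ m : Nat, pvP (l :: rest) (m + 1) = PySem.Str.len l + pvP rest m := by
          intro m; simp [pvP, List.take_succ_cons]
        refine ⟨k + 1, by simpa using hk1, ?_, ?_, ?_⟩
        · rw [hps]; omega
        · rw [hps]; omega
        · rw [goA_index_to_row_col]
          simp only [if_neg (by omega : ¬ cur + PySem.Str.len l > index)]
          rw [hk4, hps]
          simp only [Prod.mk.injEq]
          constructor
          · push_cast; ring
          · ring_nf

-- ===== VERDICT (by name: the statement is the Claim_ definition above) =====
theorem index_to_row_col_py_spec : Claim_equal_index_to_row_col_py := by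
  intro lines index _ hpre
  obtain ⟨h0, hlt⟩ := hpre
  unfold Spec_index_to_row_col_py index_to_row_col_py index_to_row_col_py_alt
  simp only [if_neg (by omega : ¬ index < 0)]
  set ends := buildEnds lines 0 with hends
  have hlen : ends.length = lines.length := buildEnds_length lines 0
  have hget : ∀ i : Nat, i < lines.length → ends.getD i 0 = pvP lines (i + 1) := by
    intro i hi
    rw [hends, buildEnds_getD lines 0 i hi]; ring
  have hmono : ∀ i j : Nat, i ≤ j → j < ends.length → ends.getD i 0 ≤ ends.getD j 0 := by
    intro i j hij hj
    rw [hget i (by omega), hget j (by omega)]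
    exact pvP_mono lines (by omega)
  have htot : (lines.map PySem.Str.len).sum = pvP lines lines.length := by
    simp [pvP]
  obtain ⟨k, hk1, hk2, hk3, hk4⟩ := goA_char lines index 0 0 h0 (by simpa using hlt)
  have hbs := bsearch_spec ends index hmono (ends.length) 0 ends.length rfl (by omega) (le_refl _)
    (by omega) (by omega)
  set r := bsearchEnds ends index 0 ends.length with hr
  obtain ⟨-, hr2, hr3, hr4⟩ := hbs
  -- r < ends.length, since ends[len-1] = total > index
  have hnz : 0 < lines.length := by
    by_contra h
    have : lines = [] := by
      cases lines with | nil => rfl | cons a b => simp at h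
    rw [this] at hlt; simp at hlt; omega
  have hrlt : r < ends.length := by
    by_contra h
    have : ends.getD (ends.length - 1) 0 ≤ index := hr3 _ (by omega)
    rw [hget (ends.length - 1) (by omega)] at this
    have : pvP lines lines.length ≤ index := by
      have := pvP_mono lines (show lines.length ≤ (ends.length - 1) + 1 by omega)
      omega
    omega
  simp only [if_neg (by omega : ¬ r = ends.length)]
  -- characterize r: P r ≤ index < P (r+1)
  have hub : index < pvP lines (r + 1) := by
    have := hr4 r (le_refl _) hrlt
    rwa [hget r (by omega)] at this
  have hlb : pvP lines r ≤ index := by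
    cases Nat.eq_zero_or_pos r with
    | inl h => simp [h, pvP_zero]; omega
    | inr h =>
        have := hr3 (r - 1) (by omega)
        rw [hget (r - 1) (by omega)] at this
        have heq : r - 1 + 1 = r := by omega
        rwa [heq] at this
  -- uniqueness: k = r
  have hkr : k = r := by
    by_contra hne
    rcases Nat.lt_or_ge k r with h' | h'
    · have := pvP_mono lines (show k + 1 ≤ r by omega); omega
    · have := pvP_mono lines (show r + 1 ≤ k by omega); omega
  rw [hk4, hkr]
  congr 1
  · omega
  · cases Nat.eq_zero_or_pos r with
    | inl h => simp [h, pvP_zero]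
    | inr h =>
        simp only [if_pos h]
        rw [hget (r - 1) (by omega)]
        have heq : r - 1 + 1 = r := by omega
        rw [heq]; omega
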